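-- pv_equiv track=rewrite | github.com/Adolher/PythonChallenges | Part 1 - Fundamentals/Chapter 2 - Mathematical Problems/Exercise 8 - Combinatorics.py | a2b2_equ_c2d2
-- ===== SOURCE A (Python) =====
-- def a2b2_equ_c2d2(min: int, max: int) -> list:
--     for a in range(min, max+1):
--         for b in range(a, max+1):
--             a2b2 = pow(a,2) + pow(b,2)
--             for c in range(min, max+1):
--                 for d in range(c, max+1):
--                     c2d2 = pow(c,2) + pow(d,2)
--
--                     if a2b2 == c2d2:
--                         yield ((a, b), (c, d))
--                         if a != b:
--                             yield ((a, b), (d, c))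
--                         if c != d:
--                             yield ((b, a), (d, c))
--                         if a != b != c != d:
--                             yield ((b, a), (c, d))
-- ===== SOURCE B (Python) =====
-- def a2b2_equ_c2d2(min: int, max: int) -> list:
--     pairs = [(c, d) for c in range(min, max + 1) for d in range(c, max + 1)]
--     groups = {}
--     for c, d in pairs:
--         groups.setdefault(c * c + d * d, []).append((c, d))
--     for a, b in pairs:
--         for c, d in groups[a * a + b * b]:
--             yield ((a, b), (c, d))
--             if a != b:
--                 yield ((a, b), (d, c))
--             if c != d:
--                 yield ((b, a), (d, c))
--             if a != b and b != c and c != d: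
--                 yield ((b, a), (c, d))
-- ===== Notes on version B (the rewrite author's own statement) =====
-- stated objective: faster
-- what changed: B precomputes one dict mapping each sum c^2+d^2 to its list of (c,d) pairs, so for every (a,b) the matching pairs are a single hash lookup instead of A's full nested (c,d) rescan.
import Mathlib
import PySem

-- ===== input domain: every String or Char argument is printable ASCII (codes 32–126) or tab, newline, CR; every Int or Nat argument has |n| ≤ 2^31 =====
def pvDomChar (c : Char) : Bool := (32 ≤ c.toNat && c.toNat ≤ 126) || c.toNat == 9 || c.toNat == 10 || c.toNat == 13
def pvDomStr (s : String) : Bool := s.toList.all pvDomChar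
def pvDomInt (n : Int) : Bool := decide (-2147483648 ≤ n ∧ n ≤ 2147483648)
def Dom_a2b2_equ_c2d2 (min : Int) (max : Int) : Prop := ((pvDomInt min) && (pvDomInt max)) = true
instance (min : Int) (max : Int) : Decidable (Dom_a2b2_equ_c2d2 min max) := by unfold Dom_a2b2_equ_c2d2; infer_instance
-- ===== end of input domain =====

-- B groups (c,d) pairs by c^2+d^2 in a dict and looks matches up per (a,b); A rescans all (c,d) per (a,b).

-- ===== PORT A =====
-- the four yields of A's innermost branch, in order
def pvEmit (a b c d : Int) : List ((Int × Int) × (Int × Int)) :=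
  [((a, b), (c, d))]
    ++ (if a ≠ b then [((a, b), (d, c))] else [])
    ++ (if c ≠ d then [((b, a), (d, c))] else [])
    ++ (if a ≠ b ∧ b ≠ c ∧ c ≠ d then [((b, a), (c, d))] else [])

def a2b2_equ_c2d2 (min : Int) (max : Int) : List ((Int × Int) × (Int × Int)) :=
  (PySem.List.pyRange min (max + 1) 1).flatMap (fun a =>
    (PySem.List.pyRange a (max + 1) 1).flatMap (fun b =>
      let a2b2 := a ^ 2 + b ^ 2
      (PySem.List.pyRange min (max + 1) 1).flatMap (fun c =>
        (PySem.List.pyRange c (max + 1) 1).flatMap (fun d =>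
          let c2d2 := c ^ 2 + d ^ 2
          if a2b2 = c2d2 then pvEmit a b c d else []))))

-- ===== PORT B =====
def pvPairs (min : Int) (max : Int) : List (Int × Int) :=
  (PySem.List.pyRange min (max + 1) 1).flatMap (fun c =>
    (PySem.List.pyRange c (max + 1) 1).map (fun d => (c, d)))

def pvGroups (min : Int) (max : Int) : PySem.Dict Int (List (Int × Int)) :=
  (pvPairs min max).foldl
    (fun g p => g.modify (p.1 * p.1 + p.2 * p.2) [] (· ++ [p])) PySem.Dict.empty

def a2b2_equ_c2d2_alt (min : Int) (max : Int) : List ((Int × Int) × (Int × Int)) :=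
  (pvPairs min max).flatMap (fun ab =>
    ((pvGroups min max).getD (ab.1 * ab.1 + ab.2 * ab.2) []).flatMap (fun cd =>
      pvEmit ab.1 ab.2 cd.1 cd.2))

-- ===== PRECONDITION & SPEC =====
def Spec_a2b2_equ_c2d2 (min : Int) (max : Int) (out : List ((Int × Int) × (Int × Int))) : Prop := out = a2b2_equ_c2d2_alt min max
instance (min : Int) (max : Int) (out : List ((Int × Int) × (Int × Int))) : Decidable (Spec_a2b2_equ_c2d2 min max out) := by unfold Spec_a2b2_equ_c2d2; infer_instance

-- ===== CLAIM (what is proved, stated in full; the proofs are below) =====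
def Claim_equal_a2b2_equ_c2d2 : Prop := ∀ (min : Int) (max : Int), Dom_a2b2_equ_c2d2 min max → Spec_a2b2_equ_c2d2 min max (a2b2_equ_c2d2 min max)

-- ===== LEMMAS AND PROOFS =====

-- the dict built by B answers each sum query with the filtered pair list
theorem pvGroups_getD (min max s : Int) :
    (pvGroups min max).getD s []
      = (pvPairs min max).filter (fun p => p.1 * p.1 + p.2 * p.2 == s) := by
  have h : pvGroups min max
      = ((pvPairs min max).map (fun p => (p.1 * p.1 + p.2 * p.2, p))).foldl
          (fun d q => d.modify q.1 [] (· ++ [q.2])) PySem.Dict.empty := by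
    rw [List.foldl_map]; rfl
  rw [h, PySem.Dict.getD_foldl_modify_append, PySem.Dict.getD_empty, List.filter_map]
  simp [Function.comp_def]

-- generic: flatMap with an equality guard = filter then flatMap
theorem flatMap_guard_eq_filter {α β : Type} (l : List α) (q : α → Bool) (f : α → List β) :
    l.flatMap (fun x => if q x = true then f x else [])
      = (l.filter q).flatMap f := by
  induction l with
  | nil => rfl
  | cons x xs ih =>
    simp only [List.flatMap_cons, List.filter_cons]
    by_cases h : q x = true <;> simp [h, ih]

theorem a2b2_eq_flatMap (min max : Int) :
    a2b2_equ_c2d2 min max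
      = (pvPairs min max).flatMap (fun ab =>
          (pvPairs min max).flatMap (fun cd =>
            if ab.1 ^ 2 + ab.2 ^ 2 = cd.1 ^ 2 + cd.2 ^ 2 then pvEmit ab.1 ab.2 cd.1 cd.2 else [])) := by
  simp only [a2b2_equ_c2d2, pvPairs, List.flatMap_assoc, List.flatMap_map]

-- ===== VERDICT (by name: the statement is the Claim_ definition above) =====
theorem a2b2_equ_c2d2_spec : Claim_equal_a2b2_equ_c2d2 := by
  intro mn mx _
  show a2b2_equ_c2d2 mn mx = a2b2_equ_c2d2_alt mn mx
  rw [a2b2_eq_flatMap]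
  unfold a2b2_equ_c2d2_alt
  congr 1
  funext ab
  rw [pvGroups_getD, ← flatMap_guard_eq_filter]
  congr 1
  funext cd
  simp only [pow_two, beq_iff_eq]
  by_cases h : ab.1 * ab.1 + ab.2 * ab.2 = cd.1 * cd.1 + cd.2 * cd.2
  · simp [h]
  · simp [h, Ne.symm h]
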